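-- pv_equiv track=rewrite | github.com/TorMari/news_classification | src/ner_rules.py | merge_person_entities
-- ===== SOURCE A (Python) =====
-- def merge_person_entities(entities):
--     merged = []
--     i = 0
--
--     while i < len(entities):
--         word, label = entities[i]
--
--         if label == "PERS" and i + 1 < len(entities):
--             next_word, next_label = entities[i + 1]
--
--             if next_label == "PER":
--                 merged.append((word + " " + next_word, "PERS"))
--                 i += 2
--                 continue
--
--         merged.append((word, label))
--         i += 1
--
--     return merged
-- ===== SOURCE B (Python) =====
-- def merge_person_entities(entities):
--     merged = []
--     fresh = False
--     for word, label in entities: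
--         if label == "PER" and fresh:
--             merged[-1] = (merged[-1][0] + " " + word, "PERS")
--             fresh = False
--         else:
--             merged.append((word, label))
--             fresh = (label == "PERS")
--     return merged
-- ===== Notes on version B (the rewrite author's own statement) =====
-- stated objective: alternative
-- what changed: Replaced the indexed while-loop with two-token lookahead and index skipping by a single forward fold that merges a PER token backwards into the previously emitted fresh PERS token, tracked by a boolean flag.
import Mathlib
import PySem

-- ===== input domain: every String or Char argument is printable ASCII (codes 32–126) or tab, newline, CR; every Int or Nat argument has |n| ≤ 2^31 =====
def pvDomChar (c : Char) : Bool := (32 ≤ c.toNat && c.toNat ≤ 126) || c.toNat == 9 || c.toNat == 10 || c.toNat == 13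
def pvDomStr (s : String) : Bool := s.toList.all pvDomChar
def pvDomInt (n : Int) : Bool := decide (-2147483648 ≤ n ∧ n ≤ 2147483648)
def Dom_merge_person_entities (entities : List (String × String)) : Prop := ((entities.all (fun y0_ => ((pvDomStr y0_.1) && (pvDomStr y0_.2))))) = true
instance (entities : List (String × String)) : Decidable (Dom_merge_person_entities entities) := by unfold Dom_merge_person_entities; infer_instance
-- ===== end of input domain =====

-- B replaces A's indexed two-token lookahead by a single forward fold that merges a
-- PER token backwards into the previously emitted fresh PERS token (objective: alternative).

-- ===== PORT A =====
-- A's while-loop over index i, transcribed as recursion on the remaining suffix: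
-- entities[i] is the head, 'i + 1 < len' is 'the tail is nonempty', 'i += 2' drops two.
def merge_person_entities (entities : List (String × String)) : List (String × String) :=
  match entities with
  | [] => []
  | (word, label) :: rest =>
    if label == "PERS" then
      match _h : rest with
      | (next_word, next_label) :: rest2 =>
        if next_label == "PER" then
          (word ++ " " ++ next_word, "PERS") :: merge_person_entities rest2
        else
          (word, label) :: merge_person_entities rest
      | [] => (word, label) :: merge_person_entities rest
    else
      (word, label) :: merge_person_entities rest
termination_by entities.length
decreasing_by all_goals simp_all

-- ===== PORT B =====
-- one fold step: state = (merged so far, fresh flag)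
def mpe_step (st : List (String × String) × Bool) (e : String × String) :
    List (String × String) × Bool :=
  if e.2 == "PER" && st.2 then
    (st.1.dropLast ++ [(((st.1.getLast?).getD ("", "")).1 ++ " " ++ e.1, "PERS")], false)
  else
    (st.1 ++ [e], e.2 == "PERS")

def merge_person_entities_alt (entities : List (String × String)) : List (String × String) :=
  (entities.foldl mpe_step ([], false)).1

-- ===== PRECONDITION & SPEC =====
def Spec_merge_person_entities (entities : List (String × String)) (out : List (String × String)) : Prop := out = merge_person_entities_alt entities
instance (entities : List (String × String)) (out : List (String × String)) : Decidable (Spec_merge_person_entities entities out) := by unfold Spec_merge_person_entities; infer_instance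

-- ===== CLAIM (what is proved, stated in full; the proofs are below) =====
def Claim_equal_merge_person_entities : Prop := ∀ (entities : List (String × String)), Dom_merge_person_entities entities → Spec_merge_person_entities entities (merge_person_entities entities)

-- ===== LEMMAS AND PROOFS =====

-- unfolding lemmas for A's recursion
theorem mA_nil : merge_person_entities [] = [] := by
  rw [merge_person_entities.eq_def]

theorem mA_merge (w nw : String) (r : List (String × String)) :
    merge_person_entities ((w, "PERS") :: (nw, "PER") :: r)
      = (w ++ " " ++ nw, "PERS") :: merge_person_entities r := by
  rw [merge_person_entities.eq_def]; simp

theorem mA_pers_nonper (w nw nl : String) (r : List (String × String)) (h : nl ≠ "PER") :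
    merge_person_entities ((w, "PERS") :: (nw, nl) :: r)
      = (w, "PERS") :: merge_person_entities ((nw, nl) :: r) := by
  rw [merge_person_entities.eq_def]; simp [h]

theorem mA_pers_nil (w : String) :
    merge_person_entities [(w, "PERS")] = [(w, "PERS")] := by
  rw [merge_person_entities.eq_def]; simp [mA_nil]

theorem mA_nonpers (w l : String) (r : List (String × String)) (h : l ≠ "PERS") :
    merge_person_entities ((w, l) :: r) = (w, l) :: merge_person_entities r := by
  rw [merge_person_entities.eq_def]; simp [h]

-- Run of B's fold from an arbitrary state. Invariant, proved by one structural induction: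
-- from flag=false the fold appends exactly A's output; from flag=true with last element
-- (w,"PERS") it appends exactly A's output for (w,"PERS") :: l.
theorem mpe_fold_invariant (l : List (String × String)) :
    (∀ acc, (l.foldl mpe_step (acc, false)).1 = acc ++ merge_person_entities l) ∧
    (∀ acc w, (l.foldl mpe_step (acc ++ [(w, "PERS")], true)).1
        = acc ++ merge_person_entities ((w, "PERS") :: l)) := by
  induction l with
  | nil => simp [mA_nil, mA_pers_nil]
  | cons e rest ih =>
    obtain ⟨nw, nl⟩ := e
    refine ⟨?_, ?_⟩
    · intro acc
      simp only [List.foldl_cons, mpe_step, Bool.and_false, Bool.false_eq_true, if_neg,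
        not_false_eq_true]
      by_cases hP : nl = "PERS"
      · subst hP
        simp only [beq_self_eq_true]
        rw [ih.2 acc nw]
      · have hPb : (nl == "PERS") = false := by simpa using hP
        rw [hPb, ih.1 (acc ++ [(nw, nl)]), mA_nonpers _ _ _ hP]
        simp
    · intro acc w
      simp only [List.foldl_cons, mpe_step, Bool.and_true]
      by_cases hR : nl = "PER"
      · subst hR
        simp only [beq_self_eq_true, if_true, List.dropLast_concat, List.getLast?_concat,
          Option.getD_some]
        rw [ih.1 (acc ++ [(w ++ " " ++ nw, "PERS")]), mA_merge]
        simp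
      · have hRb : (nl == "PER") = false := by simpa using hR
        simp only [hRb, Bool.false_eq_true, if_neg, not_false_eq_true]
        by_cases hP : nl = "PERS"
        · subst hP
          simp only [beq_self_eq_true, List.append_assoc]
          have := ih.2 (acc ++ [(w, "PERS")]) nw
          simp only [List.append_assoc] at this
          rw [this, mA_pers_nonper _ _ _ _ hR]
          simp
        · have hPb : (nl == "PERS") = false := by simpa using hP
          rw [hPb, ih.1 (acc ++ [(w, "PERS")] ++ [(nw, nl)]),
            mA_pers_nonper _ _ _ _ hR, mA_nonpers _ _ _ hP]
          simp

-- ===== VERDICT (by name: the statement is the Claim_ definition above) =====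
theorem merge_person_entities_spec : Claim_equal_merge_person_entities := by
  intro entities _
  unfold Spec_merge_person_entities merge_person_entities_alt
  simpa using ((mpe_fold_invariant entities).1 []).symm
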